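-- pv_equiv track=rewrite | github.com/xrun1018/MIT_6.042J | code_implementaion/Recursive Definition/string.py | stringLength
-- ===== SOURCE A (Python) =====
-- def stringLength(s):
--     try:
--         assert type(s) == str
--     except AssertionError:
--         s = str(s)
--     if s == '' or s[0] == '>':
--         return 0
--     if s[0] == '<' or s[0] == ',':
--         return stringLength(s[1:])
--     return 1 + stringLength(s[1:])
-- ===== SOURCE B (Python) =====
-- def stringLength(s):
--     if type(s) != str:
--         s = str(s)
--     idx = s.find('>')
--     prefix = s if idx == -1 else s[:idx]
--     return sum(1 for c in prefix if c != '<' and c != ',')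
-- ===== Notes on version B (the rewrite author's own statement) =====
-- stated objective: faster
-- what changed: Replaces the per-character recursion (which copies the remaining string at every step) with a two-phase computation: locate the first terminator with str.find, slice once, and count the kept characters in a single pass.
import Mathlib
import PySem

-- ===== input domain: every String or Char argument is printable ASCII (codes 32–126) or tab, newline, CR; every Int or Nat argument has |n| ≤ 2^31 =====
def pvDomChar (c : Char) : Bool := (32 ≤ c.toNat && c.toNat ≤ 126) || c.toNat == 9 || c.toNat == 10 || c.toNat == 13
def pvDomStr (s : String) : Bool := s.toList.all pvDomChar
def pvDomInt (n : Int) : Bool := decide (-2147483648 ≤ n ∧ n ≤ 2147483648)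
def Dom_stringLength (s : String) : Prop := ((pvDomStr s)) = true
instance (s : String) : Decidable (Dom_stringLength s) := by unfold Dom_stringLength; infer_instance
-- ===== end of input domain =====

-- B replaces A's char-by-char recursion with find-the-'>'-boundary, slice, then count; return values only.
-- ===== PORT A =====
def stringLengthGo : List Char → Int
  | [] => 0
  | c :: rest =>
    if c = '>' then 0
    else if c = '<' ∨ c = ',' then stringLengthGo rest
    else 1 + stringLengthGo rest

def stringLength (s : String) : Int := stringLengthGo s.toList

-- ===== PORT B =====
def stringLength_alt (s : String) : Int :=
  let idx := PySem.Str.find s ">"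
  let pref := if idx = -1 then s.toList else PySem.List.slice s.toList none (some idx)
  ((pref.filter (fun c => c != '<' && c != ',')).length : Int)

-- ===== PRECONDITION & SPEC =====
def Spec_stringLength (s : String) (out : Int) : Prop := out = stringLength_alt s
instance (s : String) (out : Int) : Decidable (Spec_stringLength s out) := by unfold Spec_stringLength; infer_instance

-- ===== CLAIM (what is proved, stated in full; the proofs are below) =====
def Claim_equal_stringLength : Prop := ∀ (s : String), Dom_stringLength s → Spec_stringLength s (stringLength s)

-- ===== LEMMAS AND PROOFS =====

-- A's recursion computes the count of non-'<', non-',' chars of the longest '>'-free prefix.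
theorem stringLengthGo_eq_takeWhile (cs : List Char) :
    stringLengthGo cs =
      (((cs.takeWhile (fun c => c != '>')).filter (fun c => c != '<' && c != ',')).length : Int) := by
  induction cs with
  | nil => simp [stringLengthGo]
  | cons c rest ih =>
    by_cases h : c = '>'
    · simp [stringLengthGo, h, List.takeWhile]
    · by_cases h2 : c = '<' ∨ c = ','
      · have hf : (c != '<' && c != ',') = false := by
          rcases h2 with h2 | h2 <;> simp [h2]
        simp [stringLengthGo, h, h2, List.takeWhile_cons, hf, ih]
      · push_neg at h2
        have hf : (c != '<' && c != ',') = true := by simp [h2.1, h2.2]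
        simp [stringLengthGo, h, h2.1, h2.2, List.takeWhile_cons, hf, ih]
        omega

theorem takeWhile_eq_self_of_not_mem (cs : List Char) (h : '>' ∉ cs) :
    cs.takeWhile (fun c => c != '>') = cs := by
  induction cs with
  | nil => rfl
  | cons c rest ih =>
    have hc : c ≠ '>' := fun hc => h (hc ▸ List.mem_cons_self)
    simp [List.takeWhile_cons, hc, ih (fun hm => h (List.mem_cons_of_mem _ hm))]

theorem takeWhile_eq_take (cs : List Char) (n : Nat)
    (h1 : ∀ j (hj : j < n) (hl : j < cs.length), cs[j] ≠ '>')
    (h2 : cs[n]? = some '>') :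
    cs.takeWhile (fun c => c != '>') = cs.take n := by
  induction cs generalizing n with
  | nil => simp at h2
  | cons c rest ih =>
    cases n with
    | zero =>
      simp at h2
      simp [List.takeWhile_cons, h2]
    | succ m =>
      have hc : c ≠ '>' := h1 0 (Nat.succ_pos m) (by simp)
      simp [List.takeWhile_cons, hc, List.take_succ_cons]
      exact ih m (fun j hj hl => h1 (j+1) (by omega) (by simpa using Nat.succ_lt_succ hl)) (by simpa using h2)

-- B's prefix is exactly the longest '>'-free prefix.
theorem pref_eq_takeWhile (cs : List Char) :
    (if PySem.Chars.find cs ['>'] = -1 then cs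
     else PySem.List.slice cs none (some (PySem.Chars.find cs ['>']))) =
      cs.takeWhile (fun c => c != '>') := by
  by_cases h : PySem.Chars.find cs ['>'] = -1
  · rw [if_pos h]
    have hni : ¬ ['>'] <:+: cs := (PySem.Chars.find_eq_neg_one_iff cs ['>']).mp h
    have hmem : '>' ∉ cs := by
      intro hm
      exact hni ((List.singleton_infix_iff (x := '>') (xs := cs)).mpr hm)
    exact (takeWhile_eq_self_of_not_mem cs hmem).symm
  · rw [if_neg h]
    have hspec := PySem.Chars.findFrom_natCast_spec cs ['>'] 0 (Nat.zero_le _)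
      (by simp only [Nat.cast_zero, PySem.Chars.findFrom_zero]; exact h)
    simp only [Nat.cast_zero, PySem.Chars.findFrom_zero] at hspec
    obtain ⟨hle, hpre, hmin⟩ := hspec
    set i := PySem.Chars.find cs ['>'] with hi
    have hnn : (0 : Int) ≤ i := by exact_mod_cast hle
    rw [PySem.List.slice_to cs (b := i) hnn]
    symm
    apply takeWhile_eq_take cs i.toNat
    · intro j hj hl heq
      apply hmin j (Nat.zero_le j) hj
      rw [List.drop_eq_getElem_cons hl, heq]
      exact ⟨_, rfl⟩
    · rcases hpre with ⟨t, ht⟩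
      have hlen : i.toNat < cs.length := by
        by_contra hge
        push_neg at hge
        rw [List.drop_eq_nil_of_le hge] at ht
        simp at ht
      rw [List.getElem?_eq_getElem hlen]
      have := congrArg List.head? ht
      rw [List.head?_drop, List.getElem?_eq_getElem hlen] at this
      simpa using this.symm

-- ===== VERDICT (by name: the statement is the Claim_ definition above) =====
theorem stringLength_spec : Claim_equal_stringLength := by
  intro s _
  unfold Spec_stringLength stringLength stringLength_alt
  simp only [PySem.Str.find_eq]
  have hgt : (">" : String).toList = ['>'] := rfl
  rw [hgt, pref_eq_takeWhile s.toList, stringLengthGo_eq_takeWhile]
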